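-- pv_equiv track=rewrite | github.com/SainsburyWellcomeCentre/looming_spots | looming_spots/run_crickets.py | get_from_all_trials_dict
-- ===== SOURCE A (Python) =====
-- def get_from_all_trials_dict(all_trials):
--     example_tracks_x = []
--     example_tracks_y = []
--     example_tracks_cricket_x = []
--     example_tracks_cricket_y = []
--     for group in all_trials:
--         group_examples_x =[]
--         group_examples_y =[]
--         group_examples_cricket_x =[]
--         group_examples_cricket_y =[]
--         for mouse in group:
--             for trial in mouse.values():
--                 group_examples_x.append(trial[0])
--                 group_examples_y.append(trial[1])
--                 group_examples_cricket_x.append(trial[2])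
--                 group_examples_cricket_y.append(trial[3])
--         example_tracks_x.append(group_examples_x)
--         example_tracks_y.append(group_examples_y)
--         example_tracks_cricket_x.append(group_examples_cricket_x)
--         example_tracks_cricket_y.append(group_examples_cricket_y)
--     return example_tracks_x, example_tracks_y, example_tracks_cricket_x, example_tracks_cricket_y
-- ===== SOURCE B (Python) =====
-- def get_from_all_trials_dict(all_trials):
--     def column(i):
--         return [[trial[i] for mouse in group for trial in mouse.values()]
--                 for group in all_trials]
--     return column(0), column(1), column(2), column(3)
-- ===== Notes on version B (the rewrite author's own statement) =====
-- stated objective: simpler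
-- what changed: Replaces A's single nested loop that fills four parallel accumulator lists by four independent staged passes, each a comprehension extracting one field column of the whole structure; no loop state is maintained.
import Mathlib
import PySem

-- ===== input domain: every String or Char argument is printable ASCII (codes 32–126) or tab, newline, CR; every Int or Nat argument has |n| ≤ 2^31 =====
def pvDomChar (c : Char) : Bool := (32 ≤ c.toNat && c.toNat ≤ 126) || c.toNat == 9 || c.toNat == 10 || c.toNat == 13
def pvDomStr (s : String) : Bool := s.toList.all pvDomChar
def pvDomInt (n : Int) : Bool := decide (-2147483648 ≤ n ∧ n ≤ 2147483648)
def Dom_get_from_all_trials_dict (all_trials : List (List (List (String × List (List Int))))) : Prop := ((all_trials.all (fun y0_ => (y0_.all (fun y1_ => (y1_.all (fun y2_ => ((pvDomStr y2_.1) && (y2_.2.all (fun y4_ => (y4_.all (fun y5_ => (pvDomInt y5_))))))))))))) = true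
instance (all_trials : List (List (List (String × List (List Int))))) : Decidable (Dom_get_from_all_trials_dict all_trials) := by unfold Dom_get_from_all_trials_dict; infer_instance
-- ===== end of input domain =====

-- B replaces A's single nested loop with four parallel accumulators by four independent staged column-extraction passes; simpler, same cost.


-- ===== PORT A =====
def get_from_all_trials_dict (all_trials : List (List (List (String × List (List Int))))) : List (List (List Int)) × List (List (List Int)) × List (List (List Int)) × List (List (List Int)) :=
  all_trials.foldl
    (fun acc group =>
      let g := group.foldl
        (fun gacc mouse =>
          ((PySem.Dict.ofList mouse).values).foldl
            (fun q trial =>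
              (q.1 ++ [PySem.List.pyGetD trial 0 []],
               q.2.1 ++ [PySem.List.pyGetD trial 1 []],
               q.2.2.1 ++ [PySem.List.pyGetD trial 2 []],
               q.2.2.2 ++ [PySem.List.pyGetD trial 3 []]))
            gacc)
        ([], [], [], [])
      (acc.1 ++ [g.1], acc.2.1 ++ [g.2.1], acc.2.2.1 ++ [g.2.2.1], acc.2.2.2 ++ [g.2.2.2]))
    ([], [], [], [])

-- ===== PORT B =====
-- B's helper 'column(i)': one staged pass extracting field i of every trial, grouped per group
def pvColumn (all_trials : List (List (List (String × List (List Int))))) (i : Int) : List (List (List Int)) :=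
  all_trials.map (fun group =>
    (group.flatMap (fun mouse => (PySem.Dict.ofList mouse).values)).map
      (fun trial => PySem.List.pyGetD trial i []))

def get_from_all_trials_dict_alt (all_trials : List (List (List (String × List (List Int))))) : List (List (List Int)) × List (List (List Int)) × List (List (List Int)) × List (List (List Int)) :=
  (pvColumn all_trials 0, pvColumn all_trials 1, pvColumn all_trials 2, pvColumn all_trials 3)

-- ===== PRECONDITION & SPEC =====
-- Pre_ excludes exactly the inputs on which Python A raises IndexError: some trial value of the effective dict has fewer than 4 fields.
def Pre_get_from_all_trials_dict (all_trials : List (List (List (String × List (List Int))))) : Prop :=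
  (all_trials.all (fun group => group.all (fun mouse =>
    ((PySem.Dict.ofList mouse).values).all (fun t => decide (4 ≤ t.length))))) = true
instance (all_trials : List (List (List (String × List (List Int))))) : Decidable (Pre_get_from_all_trials_dict all_trials) := by unfold Pre_get_from_all_trials_dict; infer_instance

def pvWitness_get_from_all_trials_dict : (List (List (List (String × List (List Int))))) :=
  [[[("m", [[1], [2], [3], [4]])]], []]

def Spec_get_from_all_trials_dict (all_trials : List (List (List (String × List (List Int))))) (out : List (List (List Int)) × List (List (List Int)) × List (List (List Int)) × List (List (List Int))) : Prop := out = get_from_all_trials_dict_alt all_trials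
instance (all_trials : List (List (List (String × List (List Int))))) (out : List (List (List Int)) × List (List (List Int)) × List (List (List Int)) × List (List (List Int))) : Decidable (Spec_get_from_all_trials_dict all_trials out) := by unfold Spec_get_from_all_trials_dict; infer_instance

-- ===== CLAIM (what is proved, stated in full; the proofs are below) =====
def Claim_equal_get_from_all_trials_dict : Prop := ∀ (all_trials : List (List (List (String × List (List Int))))), Dom_get_from_all_trials_dict all_trials → Pre_get_from_all_trials_dict all_trials → Spec_get_from_all_trials_dict all_trials (get_from_all_trials_dict all_trials)

-- ===== LEMMAS AND PROOFS =====

-- A's per-group inner double loop, as a named function (rfl-equal to the port's step)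
def pvGroupA (group : List (List (String × List (List Int)))) : List (List Int) × List (List Int) × List (List Int) × List (List Int) :=
  group.foldl
    (fun gacc mouse =>
      ((PySem.Dict.ofList mouse).values).foldl
        (fun q trial =>
          (q.1 ++ [PySem.List.pyGetD trial 0 []],
           q.2.1 ++ [PySem.List.pyGetD trial 1 []],
           q.2.2.1 ++ [PySem.List.pyGetD trial 2 []],
           q.2.2.2 ++ [PySem.List.pyGetD trial 3 []]))
        gacc)
    ([], [], [], [])

-- the trial values of a group, in traversal order
def pvTrials (group : List (List (String × List (List Int)))) : List (List (List Int)) :=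
  group.flatMap (fun mouse => (PySem.Dict.ofList mouse).values)

lemma foldl4 {α β : Type} (f0 f1 f2 f3 : α → List β) (ts : List α) :
    ∀ (a b c d : List (List β)),
    ts.foldl (fun q t => (q.1 ++ [f0 t], q.2.1 ++ [f1 t], q.2.2.1 ++ [f2 t], q.2.2.2 ++ [f3 t])) (a, b, c, d)
      = (a ++ ts.map f0, b ++ ts.map f1, c ++ ts.map f2, d ++ ts.map f3) := by
  induction ts with
  | nil => intro a b c d; simp
  | cons t ts ih => intro a b c d; simp [List.foldl_cons, ih]

lemma groupA_eq (group : List (List (String × List (List Int)))) :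
    pvGroupA group = ((pvTrials group).map (fun t => PySem.List.pyGetD t 0 []),
                      (pvTrials group).map (fun t => PySem.List.pyGetD t 1 []),
                      (pvTrials group).map (fun t => PySem.List.pyGetD t 2 []),
                      (pvTrials group).map (fun t => PySem.List.pyGetD t 3 [])) := by
  unfold pvGroupA
  rw [show (fun (gacc : List (List Int) × List (List Int) × List (List Int) × List (List Int)) mouse =>
        ((PySem.Dict.ofList mouse).values).foldl
          (fun q trial =>
            (q.1 ++ [PySem.List.pyGetD trial 0 []],
             q.2.1 ++ [PySem.List.pyGetD trial 1 []],
             q.2.2.1 ++ [PySem.List.pyGetD trial 2 []],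
             q.2.2.2 ++ [PySem.List.pyGetD trial 3 []])) gacc)
      = (fun gacc mouse => List.foldl
          (fun q trial =>
            (q.1 ++ [PySem.List.pyGetD trial 0 []],
             q.2.1 ++ [PySem.List.pyGetD trial 1 []],
             q.2.2.1 ++ [PySem.List.pyGetD trial 2 []],
             q.2.2.2 ++ [PySem.List.pyGetD trial 3 []])) gacc ((fun mouse => (PySem.Dict.ofList mouse).values) mouse)) from rfl,
    ← List.foldl_flatMap]
  rw [foldl4 (fun t => PySem.List.pyGetD t 0 []) (fun t => PySem.List.pyGetD t 1 [])
      (fun t => PySem.List.pyGetD t 2 []) (fun t => PySem.List.pyGetD t 3 [])]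
  simp [pvTrials]

-- ===== VERDICT (by name: the statement is the Claim_ definition above) =====
theorem get_from_all_trials_dict_spec : Claim_equal_get_from_all_trials_dict := by
  intro all_trials _ _
  unfold Spec_get_from_all_trials_dict
  have hA : get_from_all_trials_dict all_trials
      = all_trials.foldl
          (fun acc group =>
            (acc.1 ++ [(pvGroupA group).1], acc.2.1 ++ [(pvGroupA group).2.1],
             acc.2.2.1 ++ [(pvGroupA group).2.2.1], acc.2.2.2 ++ [(pvGroupA group).2.2.2]))
          ([], [], [], []) := rfl
  rw [hA, foldl4]
  simp only [List.nil_append]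
  unfold get_from_all_trials_dict_alt pvColumn
  refine Prod.ext ?_ (Prod.ext ?_ (Prod.ext ?_ ?_)) <;>
    · apply List.map_congr_left
      intro g _
      rw [groupA_eq g]; simp [pvTrials]
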